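-- pv_equiv track=rewrite | github.com/takeharukato/ansibleConfigGenerator | src/genAnsibleConf/lib/node_topology_utils.py | derive_dns_domain_for_node
-- ===== SOURCE A (Python) =====
-- from typing import Any, cast
--
-- def derive_dns_domain_for_node(
--     node: dict[str, Any],
--     networks: dict[str, dict[str, Any]],
--     dns_domain_fallback: str | None,
--     role_priority: dict[str, int],
-- ) -> str | None:
--     """ノード向け dns_domain を優先順位付きで導出する。
--
--     Args:
--         node (dict[str, Any]): 対象ノードである。
--         networks (dict[str, dict[str, Any]]): ネットワーク定義マップである。
--         dns_domain_fallback (str | None): 最終フォールバック値である。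
--         role_priority (dict[str, int]): role ごとの優先順位である。
--
--     Returns:
--         str | None: 導出したドメイン名, 未導出時は None である。
--
--     Examples:
--         >>> node = {"interfaces": [{"network": "n1"}]}
--         >>> nets = {"n1": {"role": "r", "dns_search": "example.local"}}
--         >>> derive_dns_domain_for_node(node, nets, None, {"r": 1})
--         'example.local'
--     """
--     candidates: list[tuple[int, int, str]] = []
--
--     for index, interface in enumerate(node.get('interfaces', [])):
--         network_id: Any = interface.get('network')
--         if not isinstance(network_id, str) or not network_id:
--             continue
--         network: dict[str, Any] = networks.get(network_id, {})
--         role_raw: Any = network.get('role')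
--         if not isinstance(role_raw, str) or role_raw not in role_priority:
--             continue
--
--         dns_search_raw: Any = interface.get('dns_search')
--         if not isinstance(dns_search_raw, str) or not dns_search_raw.strip():
--             dns_search_raw = network.get('dns_search')
--         if not isinstance(dns_search_raw, str):
--             continue
--
--         dns_search: str = dns_search_raw.strip()
--         if dns_search:
--             candidates.append((role_priority[role_raw], index, dns_search))
--
--     if candidates:
--         candidates.sort(key=lambda item: (item[0], item[1]))
--         return candidates[0][2]
--
--     if isinstance(dns_domain_fallback, str):
--         fallback: str = dns_domain_fallback.strip()
--         if fallback:
--             return fallback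
--
--     return None
-- ===== SOURCE B (Python) =====
-- def _candidate(interface, networks, role_priority):
--     """Return (priority, stripped_domain) for one interface, or None if it yields no candidate."""
--     network_id = interface.get('network')
--     if not isinstance(network_id, str) or not network_id:
--         return None
--     network = networks.get(network_id, {})
--     role = network.get('role')
--     if not isinstance(role, str) or role not in role_priority:
--         return None
--     raw = interface.get('dns_search')
--     if not isinstance(raw, str) or not raw.strip():
--         raw = network.get('dns_search')
--     if not isinstance(raw, str):
--         return None
--     domain = raw.strip()
--     if not domain:
--         return None
--     return (role_priority[role], domain)
--
--
-- def derive_dns_domain_for_node(node, networks, dns_domain_fallback, role_priority):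
--     # min() keeps the FIRST element with the minimal priority, which matches the
--     # stable (priority, index) sort of the original: no index bookkeeping needed.
--     best = min(
--         (c for interface in node.get('interfaces', [])
--          if (c := _candidate(interface, networks, role_priority)) is not None),
--         key=lambda c: c[0],
--         default=None,
--     )
--     if best is not None:
--         return best[1]
--     if isinstance(dns_domain_fallback, str) and dns_domain_fallback.strip():
--         return dns_domain_fallback.strip()
--     return None
-- ===== Notes on version B (the rewrite author's own statement) =====
-- stated objective: simpler
-- what changed: A builds a (priority, index, domain) candidate list and stable-sorts it by the tuple key to take the head; B extracts each interface's (priority, domain) pair with a helper and takes a single min() by priority (first minimum = stable-sort head), so the index bookkeeping and the sort disappear.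
import Mathlib
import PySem

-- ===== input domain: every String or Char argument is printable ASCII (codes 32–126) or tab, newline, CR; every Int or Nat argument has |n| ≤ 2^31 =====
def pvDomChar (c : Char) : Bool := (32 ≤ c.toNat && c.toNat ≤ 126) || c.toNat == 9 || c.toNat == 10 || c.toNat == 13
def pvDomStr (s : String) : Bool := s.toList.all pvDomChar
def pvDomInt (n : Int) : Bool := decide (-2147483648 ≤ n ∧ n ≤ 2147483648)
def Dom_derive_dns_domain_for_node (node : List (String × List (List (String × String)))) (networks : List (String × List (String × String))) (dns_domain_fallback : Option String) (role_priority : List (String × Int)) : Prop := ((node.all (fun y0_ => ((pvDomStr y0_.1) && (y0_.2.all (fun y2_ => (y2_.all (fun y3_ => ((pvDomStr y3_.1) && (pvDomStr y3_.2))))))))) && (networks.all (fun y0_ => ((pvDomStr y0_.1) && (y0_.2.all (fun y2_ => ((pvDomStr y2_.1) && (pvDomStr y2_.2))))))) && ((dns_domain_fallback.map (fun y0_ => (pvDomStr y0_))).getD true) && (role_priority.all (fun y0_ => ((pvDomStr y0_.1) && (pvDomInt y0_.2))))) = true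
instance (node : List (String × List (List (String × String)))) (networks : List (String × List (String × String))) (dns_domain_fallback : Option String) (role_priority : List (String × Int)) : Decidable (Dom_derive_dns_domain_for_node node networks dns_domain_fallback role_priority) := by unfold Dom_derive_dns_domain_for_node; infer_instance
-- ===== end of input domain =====

-- B replaces A's build-candidate-list-then-stable-sort with a per-interface extractor helper and a
-- single min() over the extracted (priority, domain) pairs (no index bookkeeping); objective: simpler.

-- ===== PORT A =====
def derive_dns_domain_for_node (node : List (String × List (List (String × String)))) (networks : List (String × List (String × String))) (dns_domain_fallback : Option String) (role_priority : List (String × Int)) : Option String :=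
  let candidates : List (Int × Int × String) :=
    (PySem.List.enumerate (PySem.Dict.getD (PySem.Dict.mk node) "interfaces" [])).foldl (fun acc e =>
      let index := e.1
      let interface := e.2
      match PySem.Dict.get? (PySem.Dict.mk interface) "network" with
      | none => acc                                  -- network_id is None → continue
      | some network_id =>
        if network_id = "" then acc else             -- 'not network_id' → continue
        let network := PySem.Dict.getD (PySem.Dict.mk networks) network_id []
        match PySem.Dict.get? (PySem.Dict.mk network) "role" with
        | none => acc                                -- role is None → continue
        | some role_raw =>
          match PySem.Dict.get? (PySem.Dict.mk role_priority) role_raw with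
          | none => acc                              -- role_raw not in role_priority → continue
          | some prio =>
            let dns_search_raw : Option String :=
              match PySem.Dict.get? (PySem.Dict.mk interface) "dns_search" with
              | some s => if PySem.Str.strip s = "" then PySem.Dict.get? (PySem.Dict.mk network) "dns_search" else some s
              | none => PySem.Dict.get? (PySem.Dict.mk network) "dns_search"
            match dns_search_raw with
            | none => acc                            -- still not a str → continue
            | some s =>
              let dns_search := PySem.Str.strip s
              if dns_search = "" then acc
              else acc ++ [(prio, index, dns_search)]) []
  if candidates.isEmpty then
    match dns_domain_fallback with
    | some f =>
      let fallback := PySem.Str.strip f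
      if fallback = "" then none else some fallback
    | none => none
  else
    match PySem.List.sorted2 candidates (fun t => t.1) (fun t => t.2.1) with
    | c :: _ => some c.2.2
    | [] => none                                     -- unreachable: candidates is nonempty

-- ===== PORT B =====
def pvCandidate (networks : List (String × List (String × String))) (role_priority : List (String × Int)) (interface : List (String × String)) : Option (Int × String) :=
  match PySem.Dict.get? (PySem.Dict.mk interface) "network" with
  | none => none
  | some network_id =>
    if network_id = "" then none else
    let network := PySem.Dict.getD (PySem.Dict.mk networks) network_id []
    match PySem.Dict.get? (PySem.Dict.mk network) "role" with
    | none => none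
    | some role =>
      match PySem.Dict.get? (PySem.Dict.mk role_priority) role with
      | none => none
      | some prio =>
        let raw : Option String :=
          match PySem.Dict.get? (PySem.Dict.mk interface) "dns_search" with
          | some s => if PySem.Str.strip s = "" then PySem.Dict.get? (PySem.Dict.mk network) "dns_search" else some s
          | none => PySem.Dict.get? (PySem.Dict.mk network) "dns_search"
        match raw with
        | none => none
        | some s =>
          let domain := PySem.Str.strip s
          if domain = "" then none else some (prio, domain)

def derive_dns_domain_for_node_alt (node : List (String × List (List (String × String)))) (networks : List (String × List (String × String))) (dns_domain_fallback : Option String) (role_priority : List (String × Int)) : Option String :=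
  match PySem.List.min? ((PySem.Dict.getD (PySem.Dict.mk node) "interfaces" []).filterMap (pvCandidate networks role_priority)) (fun c => c.1) with
  | some best => some best.2
  | none =>
    match dns_domain_fallback with
    | some f => if PySem.Str.strip f ≠ "" then some (PySem.Str.strip f) else none
    | none => none

-- ===== PRECONDITION & SPEC =====
def Spec_derive_dns_domain_for_node (node : List (String × List (List (String × String)))) (networks : List (String × List (String × String))) (dns_domain_fallback : Option String) (role_priority : List (String × Int)) (out : Option String) : Prop := out = derive_dns_domain_for_node_alt node networks dns_domain_fallback role_priority
instance (node : List (String × List (List (String × String)))) (networks : List (String × List (String × String))) (dns_domain_fallback : Option String) (role_priority : List (String × Int)) (out : Option String) : Decidable (Spec_derive_dns_domain_for_node node networks dns_domain_fallback role_priority out) := by unfold Spec_derive_dns_domain_for_node; infer_instance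

-- ===== CLAIM (what is proved, stated in full; the proofs are below) =====
def Claim_equal_derive_dns_domain_for_node : Prop := ∀ (node : List (String × List (List (String × String)))) (networks : List (String × List (String × String))) (dns_domain_fallback : Option String) (role_priority : List (String × Int)), Dom_derive_dns_domain_for_node node networks dns_domain_fallback role_priority → Spec_derive_dns_domain_for_node node networks dns_domain_fallback role_priority (derive_dns_domain_for_node node networks dns_domain_fallback role_priority)

-- ===== LEMMAS AND PROOFS =====

-- the per-enumerated-interface candidate of A's loop, as an Option
def pvCandIdx (networks : List (String × List (String × String))) (role_priority : List (String × Int)) (e : Int × List (String × String)) : Option (Int × Int × String) :=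
  (pvCandidate networks role_priority e.2).map (fun c => (c.1, e.1, c.2))

theorem candA_eq (networks : List (String × List (String × String))) (role_priority : List (String × Int)) (l : List (Int × List (String × String))) (acc : List (Int × Int × String)) :
    l.foldl (fun acc e =>
      let index := e.1
      let interface := e.2
      match PySem.Dict.get? (PySem.Dict.mk interface) "network" with
      | none => acc
      | some network_id =>
        if network_id = "" then acc else
        let network := PySem.Dict.getD (PySem.Dict.mk networks) network_id []
        match PySem.Dict.get? (PySem.Dict.mk network) "role" with
        | none => acc
        | some role_raw =>
          match PySem.Dict.get? (PySem.Dict.mk role_priority) role_raw with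
          | none => acc
          | some prio =>
            let dns_search_raw : Option String :=
              match PySem.Dict.get? (PySem.Dict.mk interface) "dns_search" with
              | some s => if PySem.Str.strip s = "" then PySem.Dict.get? (PySem.Dict.mk network) "dns_search" else some s
              | none => PySem.Dict.get? (PySem.Dict.mk network) "dns_search"
            match dns_search_raw with
            | none => acc
            | some s =>
              let dns_search := PySem.Str.strip s
              if dns_search = "" then acc
              else acc ++ [(prio, index, dns_search)]) acc
    = acc ++ l.filterMap (pvCandIdx networks role_priority) := by
  induction l generalizing acc with
  | nil => simp
  | cons e l ih =>
    rw [List.foldl_cons, ih, List.filterMap_cons]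
    simp only [pvCandIdx, pvCandidate]
    cases hn : PySem.Dict.get? (PySem.Dict.mk e.2) "network" with
    | none => simp
    | some nid =>
      by_cases he : nid = ""
      · simp [he]
      · simp only [he, if_false]
        cases hr : PySem.Dict.get? (PySem.Dict.mk (PySem.Dict.getD (PySem.Dict.mk networks) nid [])) "role" with
        | none => simp
        | some role =>
          cases hp : PySem.Dict.get? (PySem.Dict.mk role_priority) role with
          | none => simp [hp]
          | some prio =>
            cases hd : (match PySem.Dict.get? (PySem.Dict.mk e.2) "dns_search" with
              | some s => if PySem.Str.strip s = "" then PySem.Dict.get? (PySem.Dict.mk (PySem.Dict.getD (PySem.Dict.mk networks) nid [])) "dns_search" else some s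
              | none => PySem.Dict.get? (PySem.Dict.mk (PySem.Dict.getD (PySem.Dict.mk networks) nid [])) "dns_search") with
            | none => simp [hp]
            | some s =>
              by_cases hs : PySem.Str.strip s = "" <;> simp [hp, hs]

theorem head_sorted2_eq_min2? {α : Type} (xs : List α) (k1 : α → Int) (k2 : α → Int) :
    (PySem.List.sorted2 xs k1 k2 false).head? = PySem.List.min2? xs k1 k2 := by
  induction xs using List.reverseRecOn with
  | nil => rfl
  | append_singleton xs x ih =>
    have hs2 : PySem.List.sorted2 (xs ++ [x]) k1 k2 false
        = PySem.List.insertBy (fun a b => decide (k1 a < k1 b) || (!decide (k1 b < k1 a) && decide (k2 a < k2 b))) x (PySem.List.sorted2 xs k1 k2 false) := by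
      simp [PySem.List.sorted2, List.foldl_append]
    have hm2 : PySem.List.min2? (xs ++ [x]) k1 k2
        = (match PySem.List.min2? xs k1 k2 with
           | none => some x
           | some m => if (decide (k1 x < k1 m) || (!decide (k1 m < k1 x) && decide (k2 x < k2 m))) = true then some x else some m) := by
      simp only [PySem.List.min2?, List.foldl_append, List.foldl_cons, List.foldl_nil]
      rfl
    rw [hs2, hm2]
    rcases hs : PySem.List.sorted2 xs k1 k2 false with _ | ⟨m, t⟩
    · have hxs : xs = [] := by
        have := PySem.List.sorted2_perm xs k1 k2 false
        rw [hs] at this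
        exact this.nil_eq.symm
      subst hxs
      simp [PySem.List.min2?, PySem.List.insertBy]
    · rw [hs] at ih
      simp only [List.head?_cons] at ih
      rw [← ih]
      by_cases h : (decide (k1 x < k1 m) || (!decide (k1 m < k1 x) && decide (k2 x < k2 m))) = true
      · simp [PySem.List.insertBy, h]
      · simp [PySem.List.insertBy, h]

theorem min2_aux {α : Type} (k1 k2 : α → Int) (xs : List α) (m : α)
    (hm : ∀ x ∈ xs, k2 m < k2 x) (hp : xs.Pairwise (fun a b => k2 a < k2 b)) :
    xs.foldl (fun acc x => match acc with
      | none => some x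
      | some m => if (decide (k1 x < k1 m) || (!decide (k1 m < k1 x) && decide (k2 x < k2 m))) = true then some x else some m) (some m)
    = xs.foldl (fun acc x => match acc with
      | none => some x
      | some m => if k1 x < k1 m then some x else some m) (some m) := by
  induction xs generalizing m with
  | nil => rfl
  | cons y ys ih =>
    have hk : k2 m < k2 y := hm y (List.mem_cons_self)
    have hnot : ¬ (k2 y < k2 m) := by omega
    rw [List.pairwise_cons] at hp
    simp only [List.foldl_cons]
    have hcond : (decide (k1 y < k1 m) || (!decide (k1 m < k1 y) && decide (k2 y < k2 m))) = decide (k1 y < k1 m) := by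
      simp [hnot]
    rw [hcond]
    by_cases h : k1 y < k1 m
    · rw [if_pos (by simp [h]), if_pos h]
      exact ih y hp.1 hp.2
    · rw [if_neg (by simp [h]), if_neg h]
      exact ih m (fun x hx => hm x (List.mem_cons_of_mem _ hx)) hp.2

theorem min2?_eq_min? {α : Type} (xs : List α) (k1 k2 : α → Int)
    (h : xs.Pairwise (fun a b => k2 a < k2 b)) : PySem.List.min2? xs k1 k2 = PySem.List.min? xs k1 := by
  cases xs with
  | nil => rfl
  | cons x t =>
    rw [List.pairwise_cons] at h
    simp only [PySem.List.min2?, PySem.List.min?, List.foldl_cons]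
    exact min2_aux k1 k2 t x h.1 h.2

theorem foldl_min_map {α β : Type} (key : β → Int) (proj : α → β) (l : List α) (o : Option α) :
    l.foldl (fun acc a => match acc with
      | none => some (proj a)
      | some m => if key (proj a) < key m then some (proj a) else some m) (o.map proj)
    = (l.foldl (fun acc a => match acc with
      | none => some a
      | some m => if key (proj a) < key (proj m) then some a else some m) o).map proj := by
  induction l generalizing o with
  | nil => rfl
  | cons a l ih =>
    cases o with
    | none => simpa using ih (some a)
    | some m =>
      by_cases h : key (proj a) < key (proj m)
      · simpa [h] using ih (some a)
      · simpa [h] using ih (some m)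

theorem min?_map {α β : Type} (l : List α) (proj : α → β) (key : β → Int) :
    PySem.List.min? (l.map proj) key = (PySem.List.min? l (fun a => key (proj a))).map proj := by
  simp only [PySem.List.min?, List.foldl_map]
  exact foldl_min_map key proj l none


-- ===== VERDICT (by name: the statement is the Claim_ definition above) =====
theorem derive_dns_domain_for_node_spec : Claim_equal_derive_dns_domain_for_node := by
  intro node networks dns_domain_fallback role_priority _dom
  unfold Spec_derive_dns_domain_for_node
  unfold derive_dns_domain_for_node derive_dns_domain_for_node_alt
  rw [candA_eq]
  simp only [List.nil_append]
  set ifs := PySem.Dict.getD (PySem.Dict.mk node) "interfaces" [] with hifs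
  set cs := (PySem.List.enumerate ifs).filterMap (pvCandIdx networks role_priority) with hcs
  have hcands : ifs.filterMap (pvCandidate networks role_priority)
      = cs.map (fun t => (t.1, t.2.2)) := by
    rw [hcs, List.map_filterMap]
    have : ∀ e : Int × List (String × String),
        (pvCandIdx networks role_priority e).map (fun t : Int × Int × String => (t.1, t.2.2))
          = pvCandidate networks role_priority e.2 := by
      intro e
      simp only [pvCandIdx, Option.map_map]
      cases pvCandidate networks role_priority e.2 <;> rfl
    simp only [this]
    conv_lhs => rw [← PySem.List.map_snd_enumerate ifs 0, List.filterMap_map]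
    rfl
  have hpw : cs.Pairwise (fun a b => a.2.1 < b.2.1) := by
    refine List.Pairwise.filterMap _ ?_ (PySem.List.pairwise_lt_enumerate ifs 0)
    intro a b hab x hx y hy
    have hxa : x.2.1 = a.1 := by
      simp only [pvCandIdx, Option.map_eq_some_iff] at hx
      obtain ⟨c, -, rfl⟩ := hx; rfl
    have hyb : y.2.1 = b.1 := by
      simp only [pvCandIdx, Option.map_eq_some_iff] at hy
      obtain ⟨c, -, rfl⟩ := hy; rfl
    rw [hxa, hyb]; exact hab
  have hmin : (PySem.List.sorted2 cs (fun t => t.1) (fun t => t.2.1) false).head?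
      = PySem.List.min? cs (fun t => t.1) := by
    rw [head_sorted2_eq_min2?, min2?_eq_min? cs _ _ hpw]
  rw [hcands, min?_map cs (fun t : Int × Int × String => (t.1, t.2.2)) (fun c => c.1)]
  cases hcs0 : cs with
  | nil =>
    simp only [List.isEmpty_nil, if_true]
    cases dns_domain_fallback with
    | none => rfl
    | some f =>
      by_cases hf : PySem.Str.strip f = "" <;> simp [PySem.List.min?, hf]
  | cons c t =>
    rw [hcs0] at hmin
    have hne : PySem.List.min? (c :: t) (fun t : Int × Int × String => t.1) ≠ none := by
      intro h
      exact (List.cons_ne_nil c t) (((PySem.List.min?_eq_none_iff _ _).mp h))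
    rcases hm : PySem.List.min? (c :: t) (fun t : Int × Int × String => t.1) with _ | m
    · exact absurd hm hne
    · rw [hm] at hmin
      rcases hsrt : PySem.List.sorted2 (c :: t) (fun t => t.1) (fun t => t.2.1) false with _ | ⟨mm, tt⟩
      · rw [hsrt] at hmin; simp at hmin
      · rw [hsrt] at hmin
        simp only [List.head?_cons, Option.some.injEq] at hmin
        subst hmin
        simp
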